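-- pv_equiv track=rewrite | github.com/UkibaevAS/Codewars | Python/7 kyu/Running out of space.py | spacey
-- ===== SOURCE A (Python) =====
-- def spacey(array):
--     res = []
--     for i in array:
--         if len(res) != 0:
--             res.append(res[-1] + i)
--         else:
--             res.append(i)
--     return res
-- ===== SOURCE B (Python) =====
-- def spacey(array):
--     # Prefix recomputation: each output element is folded from scratch over array[:i+1].
--     def total(prefix):
--         acc = prefix[0]
--         for x in prefix[1:]:
--             acc = acc + x
--         return acc
--     return [total(array[:i + 1]) for i in range(len(array))]
-- ===== Notes on version B (the rewrite author's own statement) =====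
-- stated objective: alternative
-- what changed: Replaces A's single pass with a running accumulator by independent recomputation: each output element is folded from scratch over the prefix slice array[:i+1].
import Mathlib
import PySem

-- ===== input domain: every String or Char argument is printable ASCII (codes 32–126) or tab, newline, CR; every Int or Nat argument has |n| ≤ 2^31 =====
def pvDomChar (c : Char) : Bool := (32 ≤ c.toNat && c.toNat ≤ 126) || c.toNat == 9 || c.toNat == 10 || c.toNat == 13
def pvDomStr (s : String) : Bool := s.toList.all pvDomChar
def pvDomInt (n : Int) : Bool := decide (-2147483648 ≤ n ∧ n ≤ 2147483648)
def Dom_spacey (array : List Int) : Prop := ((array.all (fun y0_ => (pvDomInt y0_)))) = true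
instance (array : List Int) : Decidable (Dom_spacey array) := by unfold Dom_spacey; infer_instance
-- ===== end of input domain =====

-- B recomputes each output element from scratch over the prefix slice array[:i+1]; A keeps a running accumulator. Same values, different shape.

-- ===== PORT A =====
-- one loop step: append res[-1] + i (res[-1] via pyGet?; the branch guarantees it is in range, getD 0 is never used)
def spaceyStep (res : List Int) (i : Int) : List Int :=
  if res.length ≠ 0 then res ++ [(PySem.List.pyGet? res (-1)).getD 0 + i]
  else res ++ [i]

def spacey (array : List Int) : List Int :=
  array.foldl spaceyStep []

-- ===== PORT B =====
-- helper 'total' of Source B: acc = prefix[0]; for x in prefix[1:]: acc += x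
def spaceyTotal (p : List Int) : Int :=
  (PySem.List.slice p (some 1) none).foldl (· + ·) ((PySem.List.pyGet? p 0).getD 0)

def spacey_alt (array : List Int) : List Int :=
  (PySem.List.pyRange 0 array.length 1).map
    (fun i => spaceyTotal (PySem.List.slice array (some 0) (some (i + 1))))

-- ===== PRECONDITION & SPEC =====
def Spec_spacey (array : List Int) (out : List Int) : Prop := out = spacey_alt array
instance (array : List Int) (out : List Int) : Decidable (Spec_spacey array out) := by unfold Spec_spacey; infer_instance

-- ===== CLAIM (what is proved, stated in full; the proofs are below) =====
def Claim_equal_spacey : Prop := ∀ (array : List Int), Dom_spacey array → Spec_spacey array (spacey array)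

-- ===== LEMMAS AND PROOFS =====

-- canonical running prefix sums starting from acc
def pvCanon (acc : Int) : List Int → List Int
  | [] => []
  | x :: xs => (acc + x) :: pvCanon (acc + x) xs

theorem spaceyStep_nonempty (res : List Int) (a i : Int) (h : res.getLast? = some a) :
    spaceyStep res i = res ++ [a + i] := by
  have hne : res ≠ [] := by intro hh; simp [hh] at h
  simp [spaceyStep, List.length_eq_zero_iff, hne, PySem.List.pyGet?_neg_one, h]

theorem foldl_spaceyStep (l : List Int) (res : List Int) (a : Int)
    (h : res.getLast? = some a) :
    l.foldl spaceyStep res = res ++ pvCanon a l := by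
  induction l generalizing res a with
  | nil => simp [pvCanon]
  | cons x xs ih =>
    rw [List.foldl_cons, spaceyStep_nonempty res a x h,
        ih (res ++ [a + x]) (a + x) (by simp)]
    simp [pvCanon]

theorem spacey_eq_canon (x : Int) (xs : List Int) :
    spacey (x :: xs) = x :: pvCanon x xs := by
  have h0 : spaceyStep [] x = [x] := by simp [spaceyStep]
  simp only [spacey, List.foldl_cons, h0]
  simpa using foldl_spaceyStep xs [x] x (by simp)

theorem spaceyTotal_cons (x : Int) (t : List Int) :
    spaceyTotal (x :: t) = t.foldl (· + ·) x := by
  simp [spaceyTotal, PySem.List.slice_from_one]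

theorem canon_eq_map_range (l : List Int) (acc : Int) :
    pvCanon acc l =
      (List.range l.length).map (fun k => (l.take (k + 1)).foldl (· + ·) acc) := by
  induction l generalizing acc with
  | nil => simp [pvCanon]
  | cons x xs ih =>
    simp only [pvCanon, List.length_cons, List.range_succ_eq_map, List.map_cons,
      List.map_map]
    refine List.cons_eq_cons.mpr ⟨by simp, ?_⟩
    rw [ih (acc + x)]
    apply List.map_congr_left
    intro k _
    simp [List.take_succ_cons]

theorem spacey_alt_eq_map_range (l : List Int) :
    spacey_alt l =
      (List.range l.length).map (fun k => (l.take (k + 1)).foldl (· + ·) 0) := by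
  simp only [spacey_alt]
  rw [show ((l.length : Int)) = ((l.length : Nat) : Int) from rfl,
      PySem.List.pyRange_zero_natCast]
  rw [List.map_map]
  apply List.map_congr_left
  intro k hk
  have hsl : PySem.List.slice l (some ((0:Nat) : Int)) (some ((k : Int) + 1)) = l.take (k + 1) := by
    rw [show ((k : Int) + 1) = (((k + 1 : Nat)) : Int) by push_cast; ring]
    simpa using PySem.List.slice_natCast (xs := l) (a := 0) (b := k + 1)
  simp only [Function.comp_apply]
  rw [show ((0:Int)) = (((0:Nat)) : Int) from rfl, hsl]
  rw [List.mem_range] at hk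
  have hne : l.take (k + 1) ≠ [] := by
    apply List.ne_nil_of_length_pos
    simp; omega
  obtain ⟨x, t, ht⟩ := List.exists_cons_of_ne_nil hne
  rw [ht, spaceyTotal_cons]
  simp

-- ===== VERDICT (by name: the statement is the Claim_ definition above) =====
theorem spacey_spec : Claim_equal_spacey := by
  intro array _
  unfold Spec_spacey
  cases array with
  | nil => simp [spacey, spacey_alt]
  | cons x xs =>
    rw [spacey_eq_canon, spacey_alt_eq_map_range, canon_eq_map_range]
    simp only [List.length_cons, List.range_succ_eq_map, List.map_cons, List.map_map]
    refine List.cons_eq_cons.mpr ⟨by simp, ?_⟩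
    apply List.map_congr_left
    intro k _
    simp [List.take_succ_cons]
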